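-- pv_equiv track=rewrite | github.com/August1-R/awale | main.py | plateau_adverse_non_vide
-- ===== SOURCE A (Python) =====
-- def copie_plateau(plateau):
--     """
--     renvoie une copie du plateau avec une adresse mémoire différente
--     """
--     newplateau = [[t for t in i] for i in plateau]
--     return newplateau
--
-- def jouercoup(coup, plateau):
--     """
--     :param coup: les 2 premiers paramètres de coup sont les positions x et y du coup,
--     le 3ème dit à la fonction si elle peut récupérer les pierres ou pas
--     :param plateau: donne le plateau dans son état initial (avant de jouer le coup)
--     :return: renvoie le plateau une fois le coup joué, suivi du gain réalisé par le joueur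
--     """
--     pierre = plateau[coup[0]][coup[1]]  # on récupère les pierres du trou
--     plateau[coup[0]][coup[1]] = 0  # on dit qu'il n'y a plus de pierres dans le trou
--
--     # on pose les pierres une par une
--     ligne = coup[0]
--     colonne = coup[1]
--     while pierre != 0:
--         if colonne + 1 <= 5:     # si le prochain trou est dans notre ligne
--             if colonne + 1 != coup[1] or ligne != coup[0]:   # si le prochain trou n'est pas le trou de départ
--                 colonne += 1     # on avance d'un trou
--             else:       # sinon c'est que le prochain trou est le trou de départ qu'il faut sauter
--                 if colonne + 2 <= 5:     # on vérifie que le trou d'après est dans notre ligne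
--                     colonne += 2
--                 # si ce n'est pas le cas, on change de ligne
--                 elif ligne + 1 <= 1:
--                     colonne = 0
--                     ligne += 1
--                 else:
--                     colonne = 0
--                     ligne = 0
--         # si dès le départ le prochain trou n'est pas dans notre ligne
--         # et que nous sommes dans la ligne 0, nous passons dans la ligne 1
--         elif ligne + 1 <= 1:
--             if 0 != coup[1] or ligne + 1 != coup[0]:    # si le prochain trou n'est pas le trou de départ
--                 colonne = 0
--                 ligne += 1      # changement de ligne
--             else:       # sinon c'est que le prochain trou est le trou de départ qu'il faut sauter
--                 colonne = 1  # on ne repart pas au début de la colonne mais un trou après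
--                 ligne += 1
--         # Sinon c'est que dès le départ il faut passer dans la ligne 0
--         else:
--             if coup[1] != 0 or coup[0] != 0:    # si le prochain trou n'est pas le trou de départ
--                 colonne = 0
--                 ligne = 0   # changement de ligne
--             else:       # sinon c'est que le prochain trou est le trou de départ qu'il faut sauter
--                 colonne = 1
--                 ligne = 0   # on ne repart pas au début de la colonne mais un trou après
--
--         # on ajoute une graine dans le trou
--         plateau[ligne][colonne] += 1
--         pierre -= 1
--
--     # si on peut récupérer les pierres, on le fait et on renvoie le plateau, sinon on renvoie le plateau
--     gain = 0
--     if coup[2] == 1:    # si le gain est possible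
--         while True:
--             # si la case où l'on se situe contient 2 ou 3 graines et que l'on est dans un trou de l'adversaire
--             if (plateau[ligne][colonne] == 2 or plateau[ligne][colonne] == 3) and ligne != coup[0]:
--                 gain += plateau[ligne][colonne]      # on ajoute le gain
--                 plateau[ligne][colonne] = 0  # on supprime les graines du plateau
--                 if colonne - 1 >= 0:     # si le trou précédent est un trou de l'adversaire
--                     colonne -= 1     # on recule d'un trou
--                 # sinon c'est que le trou précédent est un des trous du joueur on sort donc de la fonction
--                 else:
--                     plateau.append(gain)
--                     return plateau
--             # Sinon c'est qu'on ne peut pas réaliser de gain, on sort donc de la fonction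
--             else:
--                 plateau.append(gain)
--                 return plateau
--     # Sinon c'est que la prise n'est pas autorisée, on sort de la fonction
--     else:
--         plateau.append(gain)
--         return plateau
--
-- def plateau_adverse_non_vide(coup, plateau):
--     """
--     simule de jouer le coup et vérifie que le plateau adverse n'est pas vide
--     """
--     after_play = jouercoup(coup, copie_plateau(plateau))  # on simule de jouer le coup
--     after_play.pop()
--
--     # on regarde qui est le joueur
--     if coup[0] == 1:
--         joueur_adverse = 0
--     else:
--         joueur_adverse = 1
--
--     # on vérifie qu'il y ait au moins 1 trou de l'adversaire qui ne soit pas vide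
--     for i in after_play[joueur_adverse]:
--         if i != 0:
--             return True
--     return False
-- ===== SOURCE B (Python) =====
-- def plateau_adverse_non_vide(coup, plateau):
--     """
--     simule de jouer le coup et vérifie que le plateau adverse n'est pas vide
--     (closed-form in-row sowing when the walk stays in the played row, else a
--     flat 12-hole cyclic walk with start-skip, capture as a left walk, and the
--     opponent row checked at the end)
--     """
--     r, c = coup[0], coup[1]
--     rows = [list(x) for x in plateau]
--     seeds = rows[r][c]
--     rows[r][c] = 0
--     if c + seeds <= 5:
--         # the sowing never reaches column 5, so it stays inside the played row and
--         # no capture can happen (a capture needs the landing row to differ from r):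
--         # each cell gets its seed count in closed form (divmod over the row length)
--         row = rows[r]
--         n = len(row)
--
--         def times(j):
--             d = (j - c) % n
--             if d == 0:
--                 return seeds // n
--             return (seeds - d) // n + 1 if d <= seeds else 0
--
--         rows[r] = [v + times(j) for j, v in enumerate(row)]
--     else:
--         # the walk leaves the row: flat 12-hole board in sowing order,
--         # one step = (pos+1)%12, skipping the start hole
--         board = rows[0] + rows[1]
--         start = 6 * r + c
--         pos = start
--         left = seeds
--         while left != 0:
--             pos = (pos + 1) % 12
--             if pos == start:
--                 pos = (pos + 1) % 12
--             board[pos] += 1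
--             left -= 1
--         rw, col = divmod(pos, 6)
--         if coup[2] == 1:
--             while col >= 0 and rw != r and board[6 * rw + col] in (2, 3):
--                 board[6 * rw + col] = 0
--                 col -= 1
--         rows = [board[:6], board[6:]]
--     adv = 0 if r == 1 else 1
--     return any(v != 0 for v in rows[adv])
-- ===== Notes on version B (the rewrite author's own statement) =====
-- stated objective: alternative
-- what changed: Replaces A's seed-by-seed walk over a three-branch row/column ladder by closed-form divmod sowing over the played row when the walk stays inside it (no capture can fire there), and by a flat 12-hole list with (pos+1)%12 stepping, a single start-skip test, divmod landing-cell recovery and a flat-index capture walk when it leaves it.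
-- outside the precondition, e.g. on plateau_adverse_non_vide([-2, -2, -2], [[6, 8, 4, 9, 8, 1], [4]]): A returns True, B raises IndexError
import Mathlib
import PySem

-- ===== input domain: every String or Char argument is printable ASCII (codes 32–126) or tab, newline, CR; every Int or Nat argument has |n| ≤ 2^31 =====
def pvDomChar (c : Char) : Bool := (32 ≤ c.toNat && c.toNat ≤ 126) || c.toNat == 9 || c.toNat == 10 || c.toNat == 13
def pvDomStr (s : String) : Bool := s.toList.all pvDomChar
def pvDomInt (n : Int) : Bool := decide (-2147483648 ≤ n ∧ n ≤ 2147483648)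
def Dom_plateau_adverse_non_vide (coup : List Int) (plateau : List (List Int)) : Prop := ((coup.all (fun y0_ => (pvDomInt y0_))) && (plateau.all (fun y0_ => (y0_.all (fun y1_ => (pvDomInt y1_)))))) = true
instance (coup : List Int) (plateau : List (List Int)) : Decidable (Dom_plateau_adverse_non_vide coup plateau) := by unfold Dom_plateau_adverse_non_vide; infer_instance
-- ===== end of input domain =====

-- B replaces A's seed-by-seed 2D walk by closed-form (divmod) in-row sowing when the walk
-- stays inside the played row, and by a flat 12-hole mod-12 walk when it leaves it
-- (alternative decomposition). The Python A mutates its board copy and appends/pops the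
-- gain; only the return value is claimed here (A's caller never observes the copy).

-- ===== shared subscript helpers (Python list indexing, negative = from the end) =====
-- plateau[i][j] read; exact wherever Python's indexing succeeds (guaranteed inside Pre_)
def pyGet2 (p : List (List Int)) (i j : Int) : Int :=
  (PySem.List.pyGet? ((PySem.List.pyGet? p i).getD []) j).getD 0

-- plateau[i][j] = v; exact wherever Python's indexing succeeds (guaranteed inside Pre_)
def set2 (p : List (List Int)) (i j : Int) (v : Int) : List (List Int) :=
  PySem.List.pySetD p i (PySem.List.pySetD ((PySem.List.pyGet? p i).getD []) j v)

-- ===== PORT A =====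
-- the branch ladder of A's sowing while-loop, branches in A's order
def sowNext (c0 c1 l c : Int) : Int × Int :=
  if c + 1 ≤ 5 then
    if c + 1 ≠ c1 ∨ l ≠ c0 then (l, c + 1)
    else if c + 2 ≤ 5 then (l, c + 2)
    else if l + 1 ≤ 1 then (l + 1, 0)
    else (0, 0)
  else if l + 1 ≤ 1 then
    if (0 : Int) ≠ c1 ∨ l + 1 ≠ c0 then (l + 1, 0) else (l + 1, 1)
  else
    if c1 ≠ 0 ∨ c0 ≠ 0 then (0, 0) else (0, 1)

-- `while pierre != 0` : one iteration per seed, fuel = pierre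
def sowLoopA (c0 c1 : Int) : Nat → Int → Int → List (List Int) → List (List Int) × Int × Int
  | 0, l, c, p => (p, l, c)
  | n+1, l, c, p =>
      let lc := sowNext c0 c1 l c
      sowLoopA c0 c1 n lc.1 lc.2 (set2 p lc.1 lc.2 (pyGet2 p lc.1 lc.2 + 1))

-- the capture `while True`: colonne strictly decreases, fuel = colonne+1 suffices
def capLoopA (c0 : Int) : Nat → Int → Int → List (List Int) → Int → List (List Int) × Int
  | 0, _, _, p, g => (p, g)
  | n+1, l, c, p, g =>
      if (pyGet2 p l c = 2 ∨ pyGet2 p l c = 3) ∧ l ≠ c0 then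
        if c - 1 ≥ 0 then capLoopA c0 n l (c - 1) (set2 p l c 0) (g + pyGet2 p l c)
        else (set2 p l c 0, g + pyGet2 p l c)
      else (p, g)

-- jouercoup on a copy; Python appends the gain to the board list and A pops it again:
-- here the gain is the pair's second component and is simply dropped
def jouercoupP (coup : List Int) (plateau : List (List Int)) : List (List Int) × Int :=
  let c0 := coup.getD 0 0
  let c1 := coup.getD 1 0
  let pierre := pyGet2 plateau c0 c1
  let p0 := set2 plateau c0 c1 0
  let r := sowLoopA c0 c1 pierre.toNat c0 c1 p0
  if coup.getD 2 0 = 1 then capLoopA c0 (r.2.2.toNat + 1) r.2.1 r.2.2 r.1 0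
  else (r.1, 0)

def plateau_adverse_non_vide (coup : List Int) (plateau : List (List Int)) : Bool :=
  let after := (jouercoupP coup plateau).1
  let ja : Int := if coup.getD 0 0 = 1 then 0 else 1
  ((PySem.List.pyGet? after ja).getD []).any (fun i => i != 0)

-- ===== PORT B =====
-- closed-form seed count of row cell j: d = (j-c) % n laps behind the start
def sowRowTimes (c seeds n j : Int) : Int :=
  let d := PySem.Int.mod (j - c) n
  if d = 0 then PySem.Int.floordiv seeds n
  else if d ≤ seeds then PySem.Int.floordiv (seeds - d) n + 1
  else 0

def flatGet (b : List Int) (i : Int) : Int := (PySem.List.pyGet? b i).getD 0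

def flatSet (b : List Int) (i : Int) (v : Int) : List Int := b.set i.toNat v

-- `while left != 0`: step (pos+1)%12, skip the start hole
def sowLoopB (start : Int) : Nat → Int → List Int → Int × List Int
  | 0, pos, b => (pos, b)
  | n+1, pos, b =>
      let p1 := PySem.Int.mod (pos + 1) 12
      let p2 := if p1 = start then PySem.Int.mod (p1 + 1) 12 else p1
      sowLoopB start n p2 (flatSet b p2 (flatGet b p2 + 1))

-- `while col >= 0 and rw != r and board[6*rw+col] in (2,3)`: fuel = col+1 suffices
def capLoopB (r row : Int) : Nat → Int → List Int → List Int
  | 0, _, b => b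
  | n+1, col, b =>
      if 0 ≤ col ∧ row ≠ r ∧ (flatGet b (6*row+col) = 2 ∨ flatGet b (6*row+col) = 3) then
        capLoopB r row n (col - 1) (flatSet b (6*row+col) 0)
      else b

def plateau_adverse_non_vide_alt (coup : List Int) (plateau : List (List Int)) : Bool :=
  let r := coup.getD 0 0
  let c := coup.getD 1 0
  let seeds := pyGet2 plateau r c
  let rows0 := set2 plateau r c 0
  let rows1 :=
    if c + seeds ≤ 5 then
      -- the sowing never reaches column 5: closed-form in-row sowing, no capture possible
      let row := (PySem.List.pyGet? rows0 r).getD []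
      let n : Int := (row.length : Int)
      PySem.List.pySetD rows0 r
        ((PySem.List.enumerate row).map (fun jv => jv.2 + sowRowTimes c seeds n jv.1))
    else
      -- the walk leaves the row: flat 12-hole cyclic walk with start-skip, then capture
      let board := rows0.getD 0 [] ++ rows0.getD 1 []
      let start := 6*r + c
      let sb := sowLoopB start seeds.toNat start board
      let rw := PySem.Int.floordiv sb.1 6
      let col := PySem.Int.mod sb.1 6
      let b2 := if coup.getD 2 0 = 1 then capLoopB r rw (col.toNat + 1) col sb.2 else sb.2
      [PySem.List.slice b2 none (some 6), PySem.List.slice b2 (some 6) none]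
  let adv : Int := if r = 1 then 0 else 1
  ((PySem.List.pyGet? rows1 adv).getD []).any (fun v => v != 0)

-- ===== PRECONDITION & SPEC =====
-- Pre_ admits (W) every input whose sowing walk stays inside the played row — there A sows
-- seed by seed into that row and no capture can fire — and (G) the regular 2-row × 6-hole
-- game positions. It excludes inputs on which A raises IndexError or diverges (negative
-- seed count in the played hole), and the inputs whose walk leaves the played row on a
-- board that is not 2 rows of 6 or that enter it through a negative row index: the value A
-- returns there is an accident of how far its hardcoded 2×6 walk happens to stay inside an
-- irregular board / of Python's negative-index wraparound.
def Pre_plateau_adverse_non_vide (coup : List Int) (plateau : List (List Int)) : Prop :=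
  (3 ≤ coup.length ∧ 1 ≤ plateau.length ∧
    -(plateau.length : Int) ≤ coup.getD 0 0 ∧ coup.getD 0 0 < (plateau.length : Int) ∧
    -(((PySem.List.pyGet? plateau (coup.getD 0 0)).getD []).length : Int) ≤ coup.getD 1 0 ∧
    coup.getD 1 0 < (((PySem.List.pyGet? plateau (coup.getD 0 0)).getD []).length : Int) ∧
    0 ≤ pyGet2 plateau (coup.getD 0 0) (coup.getD 1 0) ∧
    coup.getD 1 0 + pyGet2 plateau (coup.getD 0 0) (coup.getD 1 0) ≤ 5 ∧
    coup.getD 1 0 + pyGet2 plateau (coup.getD 0 0) (coup.getD 1 0)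
      < (((PySem.List.pyGet? plateau (coup.getD 0 0)).getD []).length : Int) ∧
    (coup.getD 0 0 = 1 ∨ 2 ≤ plateau.length))
  ∨
  (3 ≤ coup.length ∧ (coup.getD 0 0 = 0 ∨ coup.getD 0 0 = 1) ∧
    0 ≤ coup.getD 1 0 ∧ coup.getD 1 0 ≤ 5 ∧
    plateau.length = 2 ∧ (∀ row ∈ plateau, row.length = 6) ∧
    0 ≤ pyGet2 plateau (coup.getD 0 0) (coup.getD 1 0))

instance (coup : List Int) (plateau : List (List Int)) : Decidable (Pre_plateau_adverse_non_vide coup plateau) := by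
  unfold Pre_plateau_adverse_non_vide; infer_instance

def pvWitness_plateau_adverse_non_vide : List Int × List (List Int) :=
  ([0, 2, 1], [[4, 4, 4, 4, 4, 4], [1, 2, 0, 4, 4, 4]])

def Spec_plateau_adverse_non_vide (coup : List Int) (plateau : List (List Int)) (out : Bool) : Prop := out = plateau_adverse_non_vide_alt coup plateau
instance (coup : List Int) (plateau : List (List Int)) (out : Bool) : Decidable (Spec_plateau_adverse_non_vide coup plateau out) := by unfold Spec_plateau_adverse_non_vide; infer_instance

-- ===== CLAIM (what is proved, stated in full; the proofs are below) =====
def Claim_equal_plateau_adverse_non_vide : Prop := ∀ (coup : List Int) (plateau : List (List Int)), Dom_plateau_adverse_non_vide coup plateau → Pre_plateau_adverse_non_vide coup plateau → Spec_plateau_adverse_non_vide coup plateau (plateau_adverse_non_vide coup plateau)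

-- ===== LEMMAS AND PROOFS =====

-- ---------- the regular-game side (G): flat view of a 2×6 board ----------
def pvShape (p : List (List Int)) : Prop :=
  ∃ r0 r1 : List Int, p = [r0, r1] ∧ r0.length = 6 ∧ r1.length = 6

def pvFlat (p : List (List Int)) : List Int := p.getD 0 [] ++ p.getD 1 []

theorem pvFlat_get (p : List (List Int)) (l c : Int) (hs : pvShape p)
    (hl0 : 0 ≤ l) (hl1 : l ≤ 1) (hc0 : 0 ≤ c) (hc1 : c ≤ 5) :
    pyGet2 p l c = flatGet (pvFlat p) (6*l + c) := by
  obtain ⟨r0, r1, rfl, h6a, h6b⟩ := hs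
  have hf : pvFlat [r0, r1] = r0 ++ r1 := rfl
  interval_cases l
  · rw [show (6*0+c : Int) = c by ring]
    simp only [pyGet2, flatGet, hf, PySem.List.pyGet?_zero_cons, Option.getD_some,
      PySem.List.pyGet?_of_nonneg _ hc0]
    rw [List.getElem?_append_left (by omega)]
  · have h1 : PySem.List.pyGet? [r0, r1] (1 : Int) = some r1 := by
      rw [PySem.List.pyGet?_of_nonneg _ (by omega : (0:Int) ≤ 1)]; rfl
    simp only [pyGet2, flatGet, hf, h1, Option.getD_some,
      PySem.List.pyGet?_of_nonneg _ hc0,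
      PySem.List.pyGet?_of_nonneg _ (by omega : (0:Int) ≤ 6*1+c)]
    rw [show (6*1+c).toNat = r0.length + c.toNat by omega, List.getElem?_append_right (by omega)]
    simp

theorem pvFlat_set (p : List (List Int)) (l c v : Int) (hs : pvShape p)
    (hl0 : 0 ≤ l) (hl1 : l ≤ 1) (hc0 : 0 ≤ c) (hc1 : c ≤ 5) :
    pvFlat (set2 p l c v) = flatSet (pvFlat p) (6*l + c) v ∧ pvShape (set2 p l c v) := by
  obtain ⟨r0, r1, rfl, h6a, h6b⟩ := hs
  interval_cases l
  · have hrow : (PySem.List.pyGet? [r0, r1] (0:Int)).getD [] = r0 := by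
      rw [PySem.List.pyGet?_zero_cons]; rfl
    have hs2 : set2 [r0, r1] 0 c v = [PySem.List.pySetD r0 c v, r1] := by
      simp [set2, PySem.List.pySetD_of_nonneg _ _ (le_refl (0:Int))]
    rw [hs2, PySem.List.pySetD_of_nonneg _ _ hc0]
    constructor
    · show (r0.set c.toNat v) ++ r1 = (r0 ++ r1).set (6*0+c).toNat v
      rw [show (6*0+c).toNat = c.toNat by omega, List.set_append_left _ _ (by omega)]
    · exact ⟨r0.set c.toNat v, r1, rfl, by simp [h6a], h6b⟩
  · have hrow : (PySem.List.pyGet? [r0, r1] (1:Int)).getD [] = r1 := by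
      rw [PySem.List.pyGet?_of_nonneg _ (by omega : (0:Int) ≤ 1)]; rfl
    have hs2 : set2 [r0, r1] 1 c v = [r0, PySem.List.pySetD r1 c v] := by
      simp [set2, PySem.List.pySetD_of_nonneg _ _ (by omega : (0:Int) ≤ 1)]
    rw [hs2, PySem.List.pySetD_of_nonneg _ _ hc0]
    constructor
    · show r0 ++ (r1.set c.toNat v) = (r0 ++ r1).set (6*1+c).toNat v
      rw [show (6*1+c).toNat = r0.length + c.toNat by omega, List.set_append_right _ _ (by omega)]
      simp
    · exact ⟨r0, r1.set c.toNat v, rfl, h6a, by simp [h6b]⟩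

theorem pvStep_corr (c0 c1 l c : Int)
    (h0 : 0 ≤ c0) (h1 : c0 ≤ 1) (h2 : 0 ≤ c1) (h3 : c1 ≤ 5)
    (hl0 : 0 ≤ l) (hl1 : l ≤ 1) (hc0 : 0 ≤ c) (hc1 : c ≤ 5) :
    (6 * (sowNext c0 c1 l c).1 + (sowNext c0 c1 l c).2 =
      (let p1 := PySem.Int.mod (6*l + c + 1) 12;
       if p1 = 6*c0 + c1 then PySem.Int.mod (p1 + 1) 12 else p1)) ∧
    0 ≤ (sowNext c0 c1 l c).1 ∧ (sowNext c0 c1 l c).1 ≤ 1 ∧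
    0 ≤ (sowNext c0 c1 l c).2 ∧ (sowNext c0 c1 l c).2 ≤ 5 := by
  simp only [sowNext, PySem.Int.mod_eq_emod_of_pos (by norm_num : (0:Int) < 12)]
  split_ifs <;> simp_all <;> omega

theorem pvSow_corr (n : Nat) (c0 c1 : Int)
    (h0 : 0 ≤ c0) (h1 : c0 ≤ 1) (h2 : 0 ≤ c1) (h3 : c1 ≤ 5) :
    ∀ (l c : Int) (p : List (List Int)),
    0 ≤ l → l ≤ 1 → 0 ≤ c → c ≤ 5 → pvShape p →
    sowLoopB (6*c0 + c1) n (6*l + c) (pvFlat p)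
      = (6 * (sowLoopA c0 c1 n l c p).2.1 + (sowLoopA c0 c1 n l c p).2.2,
         pvFlat (sowLoopA c0 c1 n l c p).1)
    ∧ pvShape (sowLoopA c0 c1 n l c p).1
    ∧ 0 ≤ (sowLoopA c0 c1 n l c p).2.1 ∧ (sowLoopA c0 c1 n l c p).2.1 ≤ 1
    ∧ 0 ≤ (sowLoopA c0 c1 n l c p).2.2 ∧ (sowLoopA c0 c1 n l c p).2.2 ≤ 5 := by
  induction n with
  | zero =>
    intro l c p hl0 hl1 hc0 hc1 hs
    simp [sowLoopA, sowLoopB, hl0, hl1, hc0, hc1, hs]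
  | succ n ih =>
    intro l c p hl0 hl1 hc0 hc1 hs
    obtain ⟨hstep, a0, a1, b0, b1⟩ := pvStep_corr c0 c1 l c h0 h1 h2 h3 hl0 hl1 hc0 hc1
    obtain ⟨hset, hshape⟩ := pvFlat_set p (sowNext c0 c1 l c).1 (sowNext c0 c1 l c).2
      (pyGet2 p (sowNext c0 c1 l c).1 (sowNext c0 c1 l c).2 + 1) hs a0 a1 b0 b1
    have hget := pvFlat_get p (sowNext c0 c1 l c).1 (sowNext c0 c1 l c).2 hs a0 a1 b0 b1
    simp only [sowLoopA, sowLoopB]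
    rw [← hstep, ← hget, ← hset]
    exact ih _ _ _ a0 a1 b0 b1 hshape

theorem pvCap_corr (c0 l : Int) (hl0 : 0 ≤ l) (hl1 : l ≤ 1) :
    ∀ (n : Nat) (c : Int) (p : List (List Int)) (g : Int),
    pvShape p → 0 ≤ c → c ≤ 5 → n = c.toNat + 1 →
    pvFlat (capLoopA c0 n l c p g).1 = capLoopB c0 l n c (pvFlat p) ∧ pvShape (capLoopA c0 n l c p g).1 := by
  intro n
  induction n with
  | zero => intro c p g hs hc0 hc1 hn; omega
  | succ n ih =>
    intro c p g hs hc0 hc1 hn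
    have hget := pvFlat_get p l c hs hl0 hl1 hc0 hc1
    have hcond : ((pyGet2 p l c = 2 ∨ pyGet2 p l c = 3) ∧ l ≠ c0) ↔
        (0 ≤ c ∧ l ≠ c0 ∧ (flatGet (pvFlat p) (6*l+c) = 2 ∨ flatGet (pvFlat p) (6*l+c) = 3)) := by
      rw [← hget]; tauto
    simp only [capLoopA, capLoopB]
    by_cases h : (pyGet2 p l c = 2 ∨ pyGet2 p l c = 3) ∧ l ≠ c0
    · rw [if_pos h, if_pos (hcond.mp h)]
      obtain ⟨hset, hshape⟩ := pvFlat_set p l c 0 hs hl0 hl1 hc0 hc1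
      by_cases hcc : c - 1 ≥ 0
      · rw [if_pos hcc, ← hset]
        exact ih (c-1) _ _ hshape (by omega) (by omega) (by omega)
      · rw [if_neg hcc]
        have hn0 : n = 0 := by omega
        subst hn0
        exact ⟨by simp [capLoopB, hset], hshape⟩
    · rw [if_neg h, if_neg (fun hh => h (hcond.mpr hh))]
      exact ⟨rfl, hs⟩

theorem pvRow_any (q : List (List Int)) (hs : pvShape q) (adv : Int)
    (h : adv = 0 ∨ adv = 1) (f : Int → Bool) :
    ((PySem.List.pyGet? q adv).getD []).any f
      = ((PySem.List.pyGet?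
            [PySem.List.slice (pvFlat q) none (some 6), PySem.List.slice (pvFlat q) (some 6) none]
            adv).getD []).any f := by
  obtain ⟨r0, r1, rfl, h6a, h6b⟩ := hs
  have hf : pvFlat [r0, r1] = r0 ++ r1 := rfl
  rcases h with rfl | rfl
  · rw [hf, PySem.List.pyGet?_zero_cons, PySem.List.pyGet?_zero_cons, Option.getD_some,
      Option.getD_some, PySem.List.slice_to _ (by norm_num : (0:Int) ≤ 6),
      show Int.toNat 6 = 6 from rfl, ← h6a, List.take_left]
  · have h1 : ∀ (x y : List Int), PySem.List.pyGet? [x, y] (1 : Int) = some y := by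
      intro x y
      rw [PySem.List.pyGet?_of_nonneg _ (by omega : (0:Int) ≤ 1)]; rfl
    rw [hf, h1, h1, Option.getD_some, Option.getD_some,
      PySem.List.slice_from _ (by norm_num : (0:Int) ≤ 6),
      show Int.toNat 6 = 6 from rfl, ← h6a, List.drop_left]

-- G-side assembly: on a 2×6 board with coordinates in range, A equals B's flat branch
theorem pvEqG (coup : List Int) (plateau : List (List Int))
    (_hlen : 3 ≤ coup.length)
    (ha : coup.getD 0 0 = 0 ∨ coup.getD 0 0 = 1)
    (hb0 : 0 ≤ coup.getD 1 0) (hb1 : coup.getD 1 0 ≤ 5)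
    (hplen : plateau.length = 2) (hrows : ∀ row ∈ plateau, row.length = 6)
    (hbig : ¬ (coup.getD 1 0 + pyGet2 plateau (coup.getD 0 0) (coup.getD 1 0) ≤ 5)) :
    plateau_adverse_non_vide coup plateau = plateau_adverse_non_vide_alt coup plateau := by
  have hs : pvShape plateau := by
    match plateau, hplen with
    | [r0, r1], _ =>
      exact ⟨r0, r1, rfl, hrows r0 (by simp), hrows r1 (by simp)⟩
  have ha0 : 0 ≤ coup.getD 0 0 := by rcases ha with h | h <;> omega
  have ha1 : coup.getD 0 0 ≤ 1 := by rcases ha with h | h <;> omega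
  set a := coup.getD 0 0 with hA
  set b := coup.getD 1 0 with hB
  obtain ⟨hset0, hshape0⟩ := pvFlat_set plateau a b 0 hs ha0 ha1 hb0 hb1
  obtain ⟨hsow, hshape1, hl0', hl1', hc0', hc1'⟩ :=
    pvSow_corr (pyGet2 plateau a b).toNat a b ha0 ha1 hb0 hb1 a b (set2 plateau a b 0)
      ha0 ha1 hb0 hb1 hshape0
  set R := sowLoopA a b (pyGet2 plateau a b).toNat a b (set2 plateau a b 0) with hRdef
  -- both sides, written out (definitional unfolding of the two ports)
  have hL : plateau_adverse_non_vide coup plateau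
      = ((PySem.List.pyGet?
            (if coup.getD 2 0 = 1
              then capLoopA a (R.2.2.toNat + 1) R.2.1 R.2.2 R.1 0
              else (R.1, 0)).1
            (if a = 1 then (0:Int) else 1)).getD []).any (fun i => i != 0) := rfl
  have hR2 : plateau_adverse_non_vide_alt coup plateau
      = ((PySem.List.pyGet?
            (if b + pyGet2 plateau a b ≤ 5
              then
                PySem.List.pySetD (set2 plateau a b 0) a
                  ((PySem.List.enumerate ((PySem.List.pyGet? (set2 plateau a b 0) a).getD [])).map
                    (fun jv => jv.2 + sowRowTimes b (pyGet2 plateau a b)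
                      ((((PySem.List.pyGet? (set2 plateau a b 0) a).getD []).length : Int)) jv.1))
              else
                (let sb := sowLoopB (6*a+b) (pyGet2 plateau a b).toNat (6*a+b) (pvFlat (set2 plateau a b 0));
                 let rw := PySem.Int.floordiv sb.1 6;
                 let col := PySem.Int.mod sb.1 6;
                 let b2 := if coup.getD 2 0 = 1 then capLoopB a rw (col.toNat + 1) col sb.2 else sb.2;
                 [PySem.List.slice b2 none (some 6), PySem.List.slice b2 (some 6) none]))
            (if a = 1 then (0:Int) else 1)).getD []).any (fun v => v != 0) := rfl
  rw [hL, hR2, if_neg hbig]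
  simp only []
  rw [hsow]
  have hrow : PySem.Int.floordiv (6*R.2.1 + R.2.2) 6 = R.2.1 := by
    rw [PySem.Int.floordiv_eq_ediv_of_pos (by norm_num)]; omega
  have hcol : PySem.Int.mod (6*R.2.1 + R.2.2) 6 = R.2.2 := by
    rw [PySem.Int.mod_eq_emod_of_pos (by norm_num)]; omega
  obtain ⟨hcap, hcapshape⟩ :=
    pvCap_corr a R.2.1 hl0' hl1' (R.2.2.toNat + 1) R.2.2 R.1 0 hshape1 hc0' hc1' rfl
  rw [hrow, hcol, ← hcap, ← apply_ite pvFlat,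
      apply_ite (fun x : (List (List Int)) × Int => x.1)]
  have hQ : pvShape (if coup.getD 2 0 = 1
      then (capLoopA a (R.2.2.toNat + 1) R.2.1 R.2.2 R.1 0).1 else R.1) := by
    split_ifs
    · exact hcapshape
    · exact hshape1
  exact pvRow_any _ hQ _ (by split_ifs <;> simp) _

-- ---------- the in-row side (W) ----------
-- [W lemmas below: normalized row index, in-row sowing, fold-to-closed-form]

def incrRow (rr : List Int) (i : Int) : List Int :=
  PySem.List.pySetD rr i ((PySem.List.pyGet? rr i).getD 0 + 1)


theorem pvIdx_some (n : Nat) (a : Int) (h1 : -(n:Int) ≤ a) (h2 : a < (n:Int)) :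
    ∃ ia : Nat, PySem.List.pyIdx? n a = some ia ∧ ia < n ∧ (ia : Int) = a % (n:Int) := by
  have hn : 0 < n := by omega
  unfold PySem.List.pyIdx?
  split_ifs with h
  · exact ⟨a.toNat, rfl, by omega, by rw [Int.emod_eq_of_lt h h2]; omega⟩
  · refine ⟨n - (-a).toNat, rfl, by omega, ?_⟩
    have h0 : (a + (n:Int) * 1) % (n:Int) = a % n := Int.add_mul_emod_self_left a (n:Int) 1
    have h4 : (a + (n:Int)) % (n:Int) = a + n := Int.emod_eq_of_lt (by omega) (by omega)
    rw [show a + (n:Int) * 1 = a + n by ring] at h0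
    rw [← h0, h4]
    omega

theorem pvPyGetIdx {α : Type} (xs : List α) (a : Int) (ia : Nat)
    (hidx : PySem.List.pyIdx? xs.length a = some ia) :
    PySem.List.pyGet? xs a = xs[ia]? := by
  simp [PySem.List.pyGet?, hidx]

theorem pvPySetIdx {α : Type} (xs : List α) (a : Int) (ia : Nat) (v : α)
    (hidx : PySem.List.pyIdx? xs.length a = some ia) :
    PySem.List.pySetD xs a v = xs.set ia v := by
  simp [PySem.List.pySetD, PySem.List.pySet?, hidx]

theorem pvGetRow (p : List (List Int)) (a : Int) (ia : Nat)
    (hidx : PySem.List.pyIdx? p.length a = some ia) :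
    (PySem.List.pyGet? p a).getD [] = p.getD ia [] := by
  rw [pvPyGetIdx p a ia hidx, List.getD_eq_getElem?_getD]

theorem pvSetRow (p : List (List Int)) (a : Int) (ia : Nat) (x : List Int)
    (hidx : PySem.List.pyIdx? p.length a = some ia) :
    PySem.List.pySetD p a x = p.set ia x := pvPySetIdx p a ia x hidx

theorem pvSet2Row (p : List (List Int)) (a : Int) (ia : Nat) (j v : Int)
    (hidx : PySem.List.pyIdx? p.length a = some ia) :
    set2 p a j v = p.set ia (PySem.List.pySetD (p.getD ia []) j v) := by
  rw [set2, pvGetRow p a ia hidx, pvSetRow p a ia _ hidx]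

theorem pvGet2Row (p : List (List Int)) (a : Int) (ia : Nat) (j : Int)
    (hidx : PySem.List.pyIdx? p.length a = some ia) :
    pyGet2 p a j = (PySem.List.pyGet? (p.getD ia []) j).getD 0 := by
  rw [pyGet2, pvGetRow p a ia hidx]

theorem pvFoldRows (a : Int) (ia : Nat) :
    ∀ (idxs : List Int) (p : List (List Int)),
    PySem.List.pyIdx? p.length a = some ia → ia < p.length →
    List.foldl (fun q i => set2 q a i (pyGet2 q a i + 1)) p idxs
      = p.set ia (List.foldl incrRow (p.getD ia []) idxs) := by
  intro idxs
  induction idxs with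
  | nil =>
    intro p _ hlt
    simp only [List.foldl_nil]
    rw [List.getD_eq_getElem?_getD, List.getElem?_eq_getElem (by omega), Option.getD_some,
      List.set_getElem_self]
  | cons i idxs ih =>
    intro p hidx hlt
    have hstep : set2 p a i (pyGet2 p a i + 1) = p.set ia (incrRow (p.getD ia []) i) := by
      rw [pvSet2Row p a ia _ _ hidx, pvGet2Row p a ia _ hidx, incrRow]
    have hlen : (p.set ia (incrRow (p.getD ia []) i)).length = p.length := by simp
    have hget : (p.set ia (incrRow (p.getD ia []) i)).getD ia [] = incrRow (p.getD ia []) i := by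
      rw [List.getD_eq_getElem?_getD, List.getElem?_set_self (by omega), Option.getD_some]
    simp only [List.foldl_cons, hstep]
    rw [ih _ (by rw [hlen]; exact hidx) (by omega), hget, List.set_set]

theorem pvSowA_inrow (a c : Int) :
    ∀ (k : Nat) (cc : Int) (p : List (List Int)), c ≤ cc → cc + (k:Int) ≤ 5 →
    sowLoopA a c k a cc p
      = (List.foldl (fun q i => set2 q a i (pyGet2 q a i + 1)) p
           (PySem.List.pyRange (cc+1) (cc+1+(k:Int))), a, cc + (k:Int)) := by
  intro k
  induction k with
  | zero =>
    intro cc p _ _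
    simp [sowLoopA]
  | succ k ih =>
    intro cc p hcc hk5
    have hnext : sowNext a c a cc = (a, cc + 1) := by
      rw [sowNext, if_pos (by omega : cc + 1 ≤ 5), if_pos (by omega : cc + 1 ≠ c ∨ a ≠ a)]
    simp only [sowLoopA, hnext]
    rw [ih (cc+1) _ (by omega) (by omega),
      PySem.List.pyRange_one_cons (by push_cast; omega : cc+1 < cc+1+((k+1:Nat):Int))]
    simp only [List.foldl_cons]
    rw [show cc+1+1+((k:Nat):Int) = cc+1+((k+1:Nat):Int) by push_cast; ring,
      show cc + ((k+1:Nat):Int) = cc+1+((k:Nat):Int) by push_cast; ring]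

theorem pvTimesSucc (n s j c : Int) (hn : 0 < n) (hs : 0 ≤ s) :
    sowRowTimes c (s+1) n j
      = sowRowTimes c s n j + (if (j - c) % n = (s+1) % n then 1 else 0) := by
  simp only [sowRowTimes, PySem.Int.mod_eq_emod_of_pos hn, PySem.Int.floordiv_eq_ediv_of_pos hn]
  have hd0 : 0 ≤ (j - c) % n := Int.emod_nonneg _ (by omega)
  have hdn : (j - c) % n < n := Int.emod_lt_of_pos _ hn
  set d := (j - c) % n with hd
  have h1 : d % n = d := Int.emod_eq_of_lt hd0 hdn
  have hdelta : (d = (s+1) % n) ↔ ((s+1-d) % n = 0) := by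
    rw [← Int.emod_eq_emod_iff_emod_sub_eq_zero, h1]
    exact eq_comm
  obtain ⟨N, hN⟩ : ∃ N : Nat, (N : Int) = n := ⟨n.toNat, by omega⟩
  obtain ⟨S, hS⟩ : ∃ S : Nat, (S : Int) = s := ⟨s.toNat, by omega⟩
  obtain ⟨D, hD⟩ : ∃ D : Nat, (D : Int) = d := ⟨d.toNat, by omega⟩
  by_cases hD0 : d = 0
  · rw [if_pos hD0, if_pos hD0]
    have hdel : (d = (s+1) % n) ↔ (N ∣ S+1) := by
      rw [hdelta, show s+1-d = ((S+1 : Nat) : Int) by omega,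
        PySem.Int.emod_eq_zero_iff_dvd, ← hN, Int.natCast_dvd_natCast]
    have e1 : (s+1)/n = (((S+1)/N : Nat) : Int) := by
      rw [Int.natCast_div, hN]; congr 1; omega
    have e2 : s/n = ((S/N : Nat) : Int) := by rw [Int.natCast_div, hN, hS]
    have e3 := Nat.succ_div (a := S) (b := N)
    by_cases hnd : N ∣ S+1
    · rw [if_pos (hdel.mpr hnd), e1, e2]; rw [if_pos hnd] at e3; omega
    · rw [if_neg (fun h => hnd (hdel.mp h)), e1, e2]; rw [if_neg hnd] at e3; omega
  · by_cases hDs : d ≤ s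
    · rw [if_neg hD0, if_neg hD0, if_pos (by omega : d ≤ s+1), if_pos hDs]
      have hdel : (d = (s+1) % n) ↔ (N ∣ (S - D) + 1) := by
        rw [hdelta, show s+1-d = (((S-D)+1 : Nat) : Int) by omega,
          PySem.Int.emod_eq_zero_iff_dvd, ← hN, Int.natCast_dvd_natCast]
      have e1 : (s+1-d)/n = ((((S-D)+1)/N : Nat) : Int) := by
        rw [Int.natCast_div, hN]; congr 1; omega
      have e2 : (s-d)/n = (((S-D)/N : Nat) : Int) := by
        rw [Int.natCast_div, hN]; congr 1; omega
      have e3 := Nat.succ_div (a := S - D) (b := N)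
      by_cases hnd : N ∣ (S - D) + 1
      · rw [if_pos (hdel.mpr hnd), e1, e2]; rw [if_pos hnd] at e3; omega
      · rw [if_neg (fun h => hnd (hdel.mp h)), e1, e2]; rw [if_neg hnd] at e3; omega
    · by_cases hDs1 : d ≤ s + 1
      · rw [if_neg hD0, if_neg hD0, if_pos hDs1, if_neg hDs]
        have hds : d = s + 1 := by omega
        have hdel : d = (s+1) % n := by
          rw [← Int.emod_eq_of_lt (a := d) hd0 hdn]
          rw [hds]
        rw [if_pos hdel, show s+1-d = 0 by omega, Int.zero_ediv]
      · rw [if_neg hD0, if_neg hD0, if_neg hDs1, if_neg hDs,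
          if_neg (by rw [Int.emod_eq_of_lt (by omega) (by omega)]; omega)]
        omega

theorem pvRowFold (row : List Int) (c : Int)
    (hc0 : -(row.length:Int) ≤ c) (hc1 : c < (row.length:Int)) :
    ∀ (s : Nat), c + (s:Int) < (row.length : Int) →
    List.foldl incrRow row (PySem.List.pyRange (c+1) (c+1+(s:Int)))
      = (PySem.List.enumerate row).map
          (fun jv => jv.2 + sowRowTimes c (s:Int) ((row.length:Int)) jv.1) := by
  have hn : 0 < row.length := by omega
  intro s
  induction s with
  | zero =>
    intro _
    rw [PySem.List.pyRange_one_eq_nil (by norm_num), List.foldl_nil]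
    apply List.ext_getElem (by simp [PySem.List.length_enumerate])
    intro j hj hj2
    rw [List.getElem_map, PySem.List.getElem_enumerate]
    have hT : sowRowTimes c ((0:Nat):Int) ((row.length:Int)) (0 + (j:Int)) = 0 := by
      have hm0 : 0 ≤ PySem.Int.mod ((0:Int) + (j:Int) - c) (row.length:Int) :=
        PySem.Int.mod_nonneg _ (by omega)
      rw [sowRowTimes]
      split_ifs with h1 h2
      · rw [show ((0:Nat):Int) = 0 by rfl, PySem.Int.floordiv_eq_ediv_of_pos (by omega), Int.zero_ediv]
      · omega
      · rfl
    rw [hT, add_zero]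
  | succ s ih =>
    intro hlt
    have hlt' : c + (s:Int) < (row.length:Int) := by push_cast at hlt ⊢; omega
    rw [show c+1+((s+1:Nat):Int) = (c+1+(s:Int)) + 1 by push_cast; ring,
      PySem.List.pyRange_one_succ_right (by omega), List.foldl_append, ih hlt',
      List.foldl_cons, List.foldl_nil]
    set n : Int := (row.length : Int) with hbn
    set raw : Int := c+1+(s:Int) with hraw
    set X := (PySem.List.enumerate row).map
      (fun jv => jv.2 + sowRowTimes c ((s:Nat):Int) n jv.1) with hX
    have hlenX : X.length = row.length := by simp [hX, PySem.List.length_enumerate]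
    obtain ⟨jstar, hidx, hjlt, hjeq⟩ := pvIdx_some row.length raw (by omega) (by omega)
    rw [← hbn] at hjeq
    have hidxX : PySem.List.pyIdx? X.length raw = some jstar := by rw [hlenX]; exact hidx
    have hXj : ∀ (j : Nat) (hj : j < row.length), X[j]'(by omega)
        = row[j] + sowRowTimes c ((s:Nat):Int) n (j:Int) := by
      intro j hj
      simp only [hX, List.getElem_map, PySem.List.getElem_enumerate]
      norm_num
    have hget : (PySem.List.pyGet? X raw).getD 0 = row[jstar]'(by omega)
        + sowRowTimes c ((s:Nat):Int) n (jstar:Int) := by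
      rw [pvPyGetIdx X raw jstar hidxX, List.getElem?_eq_getElem (by omega), Option.getD_some,
        hXj jstar (by omega)]
    rw [incrRow, pvPySetIdx X raw jstar _ hidxX, hget]
    apply List.ext_getElem (by simp [PySem.List.length_enumerate, hlenX])
    intro j hj hj2
    have hjn : j < row.length := by simpa using hj2
    rw [List.getElem_set]
    simp only [List.getElem_map, PySem.List.getElem_enumerate]
    norm_num
    have hsucc := pvTimesSucc n ((s:Nat):Int) (j:Int) c (by omega) (by omega)
    rw [hsucc]
    have hdeltaiff : ((((j:Nat):Int) - c) % n = (((s:Nat):Int)+1) % n) ↔ jstar = j := by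
      have h1 : ((s:Nat):Int) + 1 = raw - c := by rw [hraw]; ring
      rw [h1, Int.emod_eq_emod_iff_emod_sub_eq_zero,
        show (j:Int) - c - (raw - c) = (j:Int) - raw by ring]
      constructor
      · intro h
        have h2 : ((j:Int)) % n = raw % n := by
          rw [Int.emod_eq_emod_iff_emod_sub_eq_zero]; exact h
        have h3 : ((j:Int)) % n = (j:Int) := Int.emod_eq_of_lt (by omega) (by omega)
        omega
      · intro h
        subst h
        rw [← Int.emod_eq_emod_iff_emod_sub_eq_zero]
        have h3 : ((jstar:Int)) % n = (jstar:Int) := Int.emod_eq_of_lt (by omega) (by omega)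
        omega
    by_cases hjj : jstar = j
    · rw [if_pos hjj, if_pos (hdeltaiff.mpr hjj)]
      subst hjj
      omega
    · rw [if_neg hjj, if_neg (fun h => hjj (hdeltaiff.mp h)), hXj j hjn]
      omega

theorem pvEqW (coup : List Int) (plateau : List (List Int))
    (_hlen : 3 ≤ coup.length) (_hL : 1 ≤ plateau.length)
    (ha0 : -(plateau.length : Int) ≤ coup.getD 0 0)
    (ha1 : coup.getD 0 0 < (plateau.length : Int))
    (hc0 : -(((PySem.List.pyGet? plateau (coup.getD 0 0)).getD []).length : Int) ≤ coup.getD 1 0)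
    (hc1 : coup.getD 1 0 < (((PySem.List.pyGet? plateau (coup.getD 0 0)).getD []).length : Int))
    (hs0 : 0 ≤ pyGet2 plateau (coup.getD 0 0) (coup.getD 1 0))
    (hcs : coup.getD 1 0 + pyGet2 plateau (coup.getD 0 0) (coup.getD 1 0) ≤ 5)
    (hcn : coup.getD 1 0 + pyGet2 plateau (coup.getD 0 0) (coup.getD 1 0)
      < (((PySem.List.pyGet? plateau (coup.getD 0 0)).getD []).length : Int)) :
    plateau_adverse_non_vide coup plateau = plateau_adverse_non_vide_alt coup plateau := by
  set a := coup.getD 0 0 with hA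
  set b := coup.getD 1 0 with hB
  obtain ⟨ia, hidx, hiaL, hiaeq⟩ := pvIdx_some plateau.length a ha0 ha1
  have hrowdef : (PySem.List.pyGet? plateau a).getD [] = plateau.getD ia [] :=
    pvGetRow _ _ _ hidx
  rw [hrowdef] at hc0 hc1 hcn
  set row := plateau.getD ia [] with hrow
  have hn0 : 0 < row.length := by omega
  have hsrow : pyGet2 plateau a b = (PySem.List.pyGet? row b).getD 0 :=
    pvGet2Row _ _ _ _ hidx
  set s := pyGet2 plateau a b with hS
  have hstn : ((s.toNat : Nat) : Int) = s := Int.toNat_of_nonneg hs0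
  set row0 := PySem.List.pySetD row b 0 with hrow0
  have hlrow0 : row0.length = row.length := PySem.List.length_pySetD _ _ _
  have hp0 : set2 plateau a b 0 = plateau.set ia row0 := pvSet2Row _ _ _ _ _ hidx
  set p0 := set2 plateau a b 0 with hp0def
  have hlp0 : p0.length = plateau.length := by rw [hp0]; simp
  have hidx' : PySem.List.pyIdx? p0.length a = some ia := by rw [hlp0]; exact hidx
  have hgot0 : p0.getD ia [] = row0 := by
    rw [hp0, List.getD_eq_getElem?_getD, List.getElem?_set_self (by omega), Option.getD_some]
  -- A's sowing: s in-row steps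
  have hsow := pvSowA_inrow a b s.toNat b p0 (le_refl b) (by omega)
  have hfold := pvFoldRows a ia (PySem.List.pyRange (b+1) (b+1+((s.toNat : Nat):Int))) p0 hidx' (by omega)
  have hrowfold := pvRowFold row0 b (by rw [hlrow0]; omega) (by rw [hlrow0]; omega) s.toNat
    (by rw [hlrow0]; omega)
  -- the final board, on both sides
  set X := (PySem.List.enumerate row0).map
    (fun jv => jv.2 + sowRowTimes b ((s.toNat : Nat):Int) ((row0.length : Nat):Int) jv.1) with hX
  have hfinal : (sowLoopA a b s.toNat a b p0).1 = plateau.set ia X := by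
    rw [hsow]
    simp only []
    rw [hfold, hgot0, hrowfold, hp0, List.set_set]
  have hl' : (sowLoopA a b s.toNat a b p0).2.1 = a := by rw [hsow]
  have hc' : (sowLoopA a b s.toNat a b p0).2.2 = b + ((s.toNat : Nat):Int) := by rw [hsow]
  set R := sowLoopA a b s.toNat a b p0 with hRdef
  -- A's capture never fires: the landing row is the played row
  have hcap : ∀ (m : Nat) (col : Int) (g : Int),
      capLoopA a (m + 1) a col R.1 g = (R.1, g) := by
    intro m col g
    simp only [capLoopA]
    rw [if_neg (by simp)]
  have hL : plateau_adverse_non_vide coup plateau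
      = ((PySem.List.pyGet?
            (if coup.getD 2 0 = 1
              then capLoopA a (R.2.2.toNat + 1) R.2.1 R.2.2 R.1 0
              else (R.1, 0)).1
            (if a = 1 then (0:Int) else 1)).getD []).any (fun i => i != 0) := rfl
  have hR2 : plateau_adverse_non_vide_alt coup plateau
      = ((PySem.List.pyGet?
            (if b + pyGet2 plateau a b ≤ 5
              then
                PySem.List.pySetD (set2 plateau a b 0) a
                  ((PySem.List.enumerate ((PySem.List.pyGet? (set2 plateau a b 0) a).getD [])).map
                    (fun jv => jv.2 + sowRowTimes b (pyGet2 plateau a b)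
                      ((((PySem.List.pyGet? (set2 plateau a b 0) a).getD []).length : Int)) jv.1))
              else
                (let sb := sowLoopB (6*a+b) (pyGet2 plateau a b).toNat (6*a+b) (pvFlat (set2 plateau a b 0));
                 let rw := PySem.Int.floordiv sb.1 6;
                 let col := PySem.Int.mod sb.1 6;
                 let b2 := if coup.getD 2 0 = 1 then capLoopB a rw (col.toNat + 1) col sb.2 else sb.2;
                 [PySem.List.slice b2 none (some 6), PySem.List.slice b2 (some 6) none]))
            (if a = 1 then (0:Int) else 1)).getD []).any (fun v => v != 0) := rfl
  have hrowB : (PySem.List.pyGet? (set2 plateau a b 0) a).getD [] = row0 := by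
    rw [← hp0def, pvGetRow _ _ _ hidx', hgot0]
  rw [hL, hR2, if_pos hcs, hrowB, ← hp0def,
    pvSetRow _ _ _ _ hidx', hp0, List.set_set, ← hS, ← hstn, ← hX]
  have hafter : (if coup.getD 2 0 = 1
      then capLoopA a (R.2.2.toNat + 1) R.2.1 R.2.2 R.1 0
      else (R.1, 0)).1 = plateau.set ia X := by
    rw [hl', hc', hcap, ite_self, hfinal]
  rw [hafter]

-- ===== VERDICT (by name: the statement is the Claim_ definition above) =====
theorem plateau_adverse_non_vide_spec : Claim_equal_plateau_adverse_non_vide := by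
  unfold Claim_equal_plateau_adverse_non_vide
  intro coup plateau _ hpre
  unfold Spec_plateau_adverse_non_vide
  rcases hpre with hW | hG
  · obtain ⟨h1, h2, h3, h4, h5, h6, h7, h8, h9, _⟩ := hW
    exact pvEqW coup plateau h1 h2 h3 h4 h5 h6 h7 h8 h9
  · obtain ⟨h1, h2, h3, h4, h5, h6, h7⟩ := hG
    by_cases hb : coup.getD 1 0 + pyGet2 plateau (coup.getD 0 0) (coup.getD 1 0) ≤ 5
    · -- the walk stays in the played row: the G input satisfies the W hypotheses
      have hsh : ∃ r0 r1 : List Int, plateau = [r0, r1] ∧ r0.length = 6 ∧ r1.length = 6 := by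
        match plateau, h5 with
        | [r0, r1], _ => exact ⟨r0, r1, rfl, h6 r0 (by simp), h6 r1 (by simp)⟩
      obtain ⟨r0, r1, rfl, h6a, h6b⟩ := hsh
      have hrow : (PySem.List.pyGet? [r0, r1] (coup.getD 0 0)).getD [] =
          (if coup.getD 0 0 = 0 then r0 else r1) := by
        rcases h2 with h | h <;> rw [h]
        · simp
        · rw [PySem.List.pyGet?_of_nonneg _ (by omega : (0:Int) ≤ 1)]; simp
      have hn : (((PySem.List.pyGet? [r0, r1] (coup.getD 0 0)).getD []).length : Int) = 6 := by
        rw [hrow]; split_ifs <;> simp [h6a, h6b]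
      exact pvEqW coup [r0, r1] h1 (by simp)
        (by rcases h2 with h | h <;> rw [h] <;> norm_num)
        (by rcases h2 with h | h <;> rw [h] <;> norm_num)
        (by omega) (by omega) h7 hb (by omega)
    · exact pvEqG coup plateau h1 h2 h3 h4 h5 h6 hb
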